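-- pv_equiv track=rewrite | github.com/Mingdoo/algorithm_ct | algorithm/baekjoon/2292_벌집/sss.py | solution
-- ===== SOURCE A (Python) =====
-- from collections import defaultdict
--
-- def solution(address_book):
--     answer = 0
--     phone_book = defaultdict(set)
--     for name, number in address_book:
--         number = number.replace('-', '')
--         number = number.replace(' ', '')
--         phone_book[name].add(number)
--     for item in phone_book.values():
--         if len(item) > 1:
--             answer += len(item)
--     return answer
-- ===== SOURCE B (Python) =====
-- def solution(address_book):
--     # sort-then-grouped-scan: normalize, sort by name, peel off one name-group
--     # per iteration and add its distinct-number count when it exceeds 1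
--     pairs = sorted(((name, number.replace('-', '').replace(' ', ''))
--                     for name, number in address_book), key=lambda p: p[0])
--     answer = 0
--     while pairs:
--         name = pairs[0][0]
--         distinct = len({num for n, num in pairs if n == name})
--         pairs = [(n, num) for n, num in pairs if n != name]
--         if distinct > 1:
--             answer += distinct
--     return answer
-- ===== Notes on version B (the rewrite author's own statement) =====
-- stated objective: alternative
-- what changed: Replaces the defaultdict-of-sets hash grouping with a sort-by-name then grouped-scan that repeatedly peels off one name's group, counts its distinct normalized numbers, and filters that name out of the remaining list.
import Mathlib
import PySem

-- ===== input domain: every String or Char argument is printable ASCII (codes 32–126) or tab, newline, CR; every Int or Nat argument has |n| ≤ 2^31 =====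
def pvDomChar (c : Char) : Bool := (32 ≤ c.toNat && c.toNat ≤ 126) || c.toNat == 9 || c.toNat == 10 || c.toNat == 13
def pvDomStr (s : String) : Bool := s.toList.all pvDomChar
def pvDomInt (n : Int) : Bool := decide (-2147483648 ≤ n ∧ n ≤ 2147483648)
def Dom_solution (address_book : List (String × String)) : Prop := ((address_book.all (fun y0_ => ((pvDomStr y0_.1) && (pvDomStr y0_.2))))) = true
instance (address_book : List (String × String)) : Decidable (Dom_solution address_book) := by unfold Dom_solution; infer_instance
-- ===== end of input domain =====

-- B replaces A's defaultdict-of-sets grouping by sort-by-name + grouped scan (objective: alternative).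

-- ===== PORT A =====
-- one pass building a dict name -> set of normalized numbers, then summing set sizes > 1
def solution (address_book : List (String × String)) : Int :=
  let phone_book : PySem.Dict String (PySem.Set String) :=
    address_book.foldl
      (fun d p =>
        let number := PySem.Str.replace (PySem.Str.replace p.2 "-" "") " " ""
        d.insert p.1 (PySem.Set.add (d.getD p.1 PySem.Set.empty) number))
      PySem.Dict.empty
  phone_book.values.foldl
    (fun answer item => if 1 < item.length then answer + (item.length : Int) else answer) 0

-- ===== PORT B =====
-- peel off the first remaining name's whole group, count its distinct numbers, recurse on the rest
def solutionAltLoop : List (String × String) → Int → Int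
  | [], answer => answer
  | (name, num) :: rest, answer =>
      let pairs := (name, num) :: rest
      let distinct : Int :=
        ((PySem.Set.ofList ((pairs.filter (fun p => p.1 == name)).map Prod.snd)).length : Int)
      solutionAltLoop (pairs.filter (fun p => p.1 != name))
        (if 1 < distinct then answer + distinct else answer)
  termination_by pairs _ => pairs.length
  decreasing_by
    simp only [List.filter_cons, bne_self_eq_false]
    exact Nat.lt_succ_of_le (List.length_filter_le _ _)

def solution_alt (address_book : List (String × String)) : Int :=
  solutionAltLoop
    (PySem.List.sorted
      (address_book.map (fun p => (p.1, PySem.Str.replace (PySem.Str.replace p.2 "-" "") " " "")))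
      Prod.fst false) 0

-- ===== PRECONDITION & SPEC =====
def Spec_solution (address_book : List (String × String)) (out : Int) : Prop := out = solution_alt address_book
instance (address_book : List (String × String)) (out : Int) : Decidable (Spec_solution address_book out) := by unfold Spec_solution; infer_instance

-- ===== CLAIM (what is proved, stated in full; the proofs are below) =====
def Claim_equal_solution : Prop := ∀ (address_book : List (String × String)), Dom_solution address_book → Spec_solution address_book (solution address_book)

-- ===== LEMMAS AND PROOFS =====

-- distinct-number count of name k in list M, and its contribution
def pvCnt (k : String) (M : List (String × String)) : Nat :=
  ((M.filter (fun p => p.1 == k)).map Prod.snd).toFinset.card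

def pvG (k : String) (M : List (String × String)) : Int :=
  if 1 < pvCnt k M then (pvCnt k M : Int) else 0

def pvSum (M : List (String × String)) : Int :=
  ∑ k ∈ (M.map Prod.fst).toFinset, pvG k M

-- (Set.ofList l).length counts distinct elements
theorem pvLen_ofList (l : List String) : (PySem.Set.ofList l).length = l.toFinset.card := by
  have hnd : (PySem.Set.ofList l).Nodup := PySem.Set.nodup_ofList l
  have hfs : (PySem.Set.ofList l).toFinset = l.toFinset := by
    ext x
    simp [List.mem_toFinset, PySem.Set.mem_ofList]
  calc (PySem.Set.ofList l).length = (PySem.Set.ofList l).toFinset.card :=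
        (List.toFinset_card_of_nodup hnd).symm
    _ = l.toFinset.card := by rw [hfs]

-- the dict A builds: getD of a fold of set-inserts
theorem pvBuildGetD (L : List (String × String)) (d : PySem.Dict String (PySem.Set String))
    (c : String) :
    (L.foldl (fun d p => d.insert p.1 (PySem.Set.add (d.getD p.1 PySem.Set.empty) p.2)) d).getD c PySem.Set.empty
      = PySem.Set.update (d.getD c PySem.Set.empty) ((L.filter (fun p => p.1 == c)).map Prod.snd) := by
  induction L generalizing d with
  | nil => simp [PySem.Set.update]
  | cons q t ih =>
      simp only [List.foldl_cons, ih]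
      by_cases h : q.1 = c
      · subst h
        simp [PySem.Set.update]
      · have h' : (q.1 == c) = false := by simp [h]
        have h'' : c ≠ q.1 := fun e => h e.symm
        simp [h', PySem.Dict.getD_insert, h'']

theorem pvFilter_filter_ne (M : List (String × String)) (name k : String) (hk : k ≠ name) :
    ((M.filter (fun p => p.1 != name)).filter (fun p => p.1 == k)) = M.filter (fun p => p.1 == k) := by
  rw [List.filter_filter]
  apply List.filter_congr
  intro p _
  by_cases h : p.1 = k
  · simp [h, hk]
  · simp [h]

theorem pvG_filter_ne (M : List (String × String)) (name k : String) (hk : k ≠ name) :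
    pvG k (M.filter (fun p => p.1 != name)) = pvG k M := by
  unfold pvG pvCnt
  rw [pvFilter_filter_ne M name k hk]

-- pvSum is invariant under permutation
theorem pvCnt_perm {M M' : List (String × String)} (h : M.Perm M') (k : String) :
    pvCnt k M = pvCnt k M' := by
  unfold pvCnt
  have hp : ((M.filter (fun p => p.1 == k)).map Prod.snd).Perm
      ((M'.filter (fun p => p.1 == k)).map Prod.snd) := ((h.filter _).map _)
  have hfs : ((M.filter (fun p => p.1 == k)).map Prod.snd).toFinset
      = ((M'.filter (fun p => p.1 == k)).map Prod.snd).toFinset := by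
    ext x; simp only [List.mem_toFinset, hp.mem_iff]
  rw [hfs]

theorem pvSum_perm {M M' : List (String × String)} (h : M.Perm M') : pvSum M = pvSum M' := by
  unfold pvSum
  have hn : (M.map Prod.fst).toFinset = (M'.map Prod.fst).toFinset := by
    ext x; simp only [List.mem_toFinset, (h.map _).mem_iff]
  rw [hn]
  apply Finset.sum_congr rfl
  intro k _
  unfold pvG
  rw [pvCnt_perm h k]

-- B's loop computes pvSum
theorem pvLoop_eq (M : List (String × String)) (a : Int) :
    solutionAltLoop M a = a + pvSum M := by
  induction hn : M.length using Nat.strong_induction_on generalizing M a with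
  | _ n ih =>
    match M with
    | [] => simp [solutionAltLoop, pvSum]
    | (name, num) :: rest =>
      rw [solutionAltLoop]
      have hhead : ((name, num) :: rest).filter (fun p => p.1 != name)
          = rest.filter (fun p => p.1 != name) := by simp
      set rest' := rest.filter (fun p => p.1 != name) with hrest'
      have hlt : rest'.length < n := by
        subst hn
        exact Nat.lt_succ_of_le (List.length_filter_le _ _)
      rw [hhead, ih rest'.length hlt rest' _ rfl]
      -- turn the head contribution into pvG name M
      have hcnt : ((PySem.Set.ofList ((((name, num) :: rest).filter (fun p => p.1 == name)).map Prod.snd)).length)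
          = pvCnt name ((name, num) :: rest) := by
        rw [pvLen_ofList]; rfl
      have hname_not : name ∉ (rest'.map Prod.fst).toFinset := by
        simp only [List.mem_toFinset, List.mem_map]
        rintro ⟨p, hp, hp1⟩
        rw [hrest'] at hp
        have := List.of_mem_filter hp
        simp [hp1] at this
      have hfs : (((name, num) :: rest).map Prod.fst).toFinset
          = insert name (rest'.map Prod.fst).toFinset := by
        ext x
        simp only [List.map_cons, List.toFinset_cons, Finset.mem_insert, List.mem_toFinset,
          List.mem_map, hrest']
        constructor
        · rintro (hx | ⟨p, hp, hp1⟩)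
          · exact Or.inl hx
          · by_cases hxn : x = name
            · exact Or.inl hxn
            · refine Or.inr ⟨p, List.mem_filter.mpr ⟨hp, ?_⟩, hp1⟩
              simp [hp1, hxn]
        · rintro (hx | ⟨p, hp, hp1⟩)
          · exact Or.inl hx
          · exact Or.inr ⟨p, (List.mem_filter.mp hp).1, hp1⟩
      have hsum : pvSum ((name, num) :: rest) = pvG name ((name, num) :: rest) + pvSum rest' := by
        unfold pvSum
        rw [hfs, Finset.sum_insert hname_not]
        congr 1
        apply Finset.sum_congr rfl
        intro k hk
        have hk_ne : k ≠ name := by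
          rintro rfl; exact hname_not hk
        have := pvG_filter_ne ((name, num) :: rest) name k hk_ne
        rw [← this, hhead, hrest']
      rw [hsum]
      unfold pvG
      rw [← hcnt]
      split_ifs with h1 <;> push_cast at * <;> omega

-- A computes pvSum
theorem pvA_eq (ab : List (String × String)) : solution ab = pvSum (ab.map (fun p => (p.1, PySem.Str.replace (PySem.Str.replace p.2 "-" "") " " ""))) := by
  unfold solution
  show ((ab.foldl
      (fun d p =>
        let number := PySem.Str.replace (PySem.Str.replace p.2 "-" "") " " ""
        d.insert p.1 (PySem.Set.add (d.getD p.1 PySem.Set.empty) number))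
      PySem.Dict.empty).values.foldl
    (fun answer item => if 1 < item.length then answer + (item.length : Int) else answer) 0) = _
  set L := ab.map (fun p => (p.1, PySem.Str.replace (PySem.Str.replace p.2 "-" "") " " "")) with hL
  have hfold : ab.foldl
      (fun d p =>
        let number := PySem.Str.replace (PySem.Str.replace p.2 "-" "") " " ""
        d.insert p.1 (PySem.Set.add (d.getD p.1 PySem.Set.empty) number))
      PySem.Dict.empty
      = L.foldl (fun d p => d.insert p.1 (PySem.Set.add (d.getD p.1 PySem.Set.empty) p.2)) PySem.Dict.empty := by
    rw [hL, List.foldl_map]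
  rw [hfold]
  set d := L.foldl (fun d p => d.insert p.1 (PySem.Set.add (d.getD p.1 PySem.Set.empty) p.2)) PySem.Dict.empty with hd
  have hkeys : d.keys = PySem.Set.ofList (L.map Prod.fst) := by
    rw [hd]
    rw [PySem.Dict.keys_foldl_insert_key (key := Prod.fst)
      (f := fun d p => PySem.Set.add (d.getD p.1 PySem.Set.empty) p.2)]
    simp [PySem.Dict.keys_empty, PySem.Set.update, PySem.Set.ofList_eq_foldl]
  have hnodup : d.keys.Nodup := by
    rw [hkeys]; exact PySem.Set.nodup_ofList _
  have hvals : d.values = d.keys.map (fun k => d.getD k PySem.Set.empty) :=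
    PySem.Dict.values_eq_map_keys d hnodup PySem.Set.empty
  have hgetD : ∀ c, d.getD c PySem.Set.empty
      = PySem.Set.ofList ((L.filter (fun p => p.1 == c)).map Prod.snd) := by
    intro c
    rw [hd, pvBuildGetD]
    simp [PySem.Dict.getD_empty, PySem.Set.update, PySem.Set.ofList_eq_foldl, PySem.Set.empty]
  rw [hvals, hkeys]
  -- fold of the if-accumulator is a sum
  have hfoldsum : ∀ (vs : List (PySem.Set String)),
      vs.foldl (fun answer item => if 1 < item.length then answer + (item.length : Int) else answer) 0
      = (vs.map (fun item => if 1 < item.length then (item.length : Int) else 0)).sum := by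
    intro vs
    have := PySem.List.foldl_congr_mem
      (l := vs) (init := (0 : Int))
      (f := fun answer item => if 1 < item.length then answer + (item.length : Int) else answer)
      (g := fun answer item => answer + (if 1 < item.length then (item.length : Int) else 0))
      (by intro acc x _; dsimp only; split_ifs <;> simp)
    rw [this, PySem.List.foldl_add]
    simp
  rw [hfoldsum]
  unfold pvSum
  rw [List.map_map]
  have hperm : (PySem.Set.ofList (L.map Prod.fst)).Perm ((L.map Prod.fst).dedup) := by
    apply List.Perm.symm
    apply (List.perm_ext_iff_of_nodup (List.nodup_dedup _) (PySem.Set.nodup_ofList _)).mpr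
    intro x
    simp [List.mem_dedup, PySem.Set.mem_ofList]
  have hmsum : (((PySem.Set.ofList (L.map Prod.fst))).map
      ((fun item => if 1 < item.length then (item.length : Int) else 0) ∘ (fun k => d.getD k PySem.Set.empty))).sum
      = ∑ k ∈ (L.map Prod.fst).toFinset, pvG k L := by
    rw [List.Perm.sum_eq (hperm.map _)]
    rw [← List.sum_toFinset _ (List.nodup_dedup _)]
    have hdf : (L.map Prod.fst).dedup.toFinset = (L.map Prod.fst).toFinset := by
      ext x; simp [List.mem_dedup]
    rw [hdf]
    apply Finset.sum_congr rfl
    intro k _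
    simp only [Function.comp, hgetD k, pvG, pvCnt, pvLen_ofList]
  exact hmsum

-- ===== VERDICT (by name: the statement is the Claim_ definition above) =====
theorem solution_spec : Claim_equal_solution := by
  intro ab _
  unfold Spec_solution solution_alt
  rw [pvLoop_eq, pvA_eq]
  have hperm := PySem.List.sorted_perm
    (ab.map (fun p => (p.1, PySem.Str.replace (PySem.Str.replace p.2 "-" "") " " ""))) Prod.fst false
  rw [pvSum_perm hperm]
  ring
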